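-- pv_equiv track=rewrite | github.com/junaidi-ai/med-vllm | medvllm/metrics/text_metrics.py | _ngram_overlap_stats
-- ===== SOURCE A (Python) =====
-- from typing import Dict, List, Sequence, Tuple
-- from collections import Counter
--
-- def _ngrams(tokens: Sequence[str], n: int) -> Counter:
--     if n <= 0:
--         return Counter()
--     return Counter(tuple(tokens[i : i + n]) for i in range(0, max(0, len(tokens) - n + 1)))
--
-- def _ngram_overlap_stats(
--     ref_tokens: Sequence[str], cand_tokens: Sequence[str], n: int
-- ) -> Tuple[int, int, int]:
--     """Return (overlap, cand_total, ref_total) for n-grams of order n."""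
--     ref_ngr = _ngrams(ref_tokens, n)
--     cand_ngr = _ngrams(cand_tokens, n)
--     overlap = 0
--     for ng, c in cand_ngr.items():
--         overlap += min(c, ref_ngr.get(ng, 0))
--     return overlap, sum(cand_ngr.values()), sum(ref_ngr.values())
-- ===== SOURCE B (Python) =====
-- def _ngram_overlap_stats(ref_tokens, cand_tokens, n):
--     """Return (overlap, cand_total, ref_total) for n-grams of order n.
--
--     Single-dict clipping pass: build only the reference n-gram counts, then
--     consume them while scanning the candidate n-grams one at a time."""
--     if n <= 0:
--         return 0, 0, 0
--     ref_total = max(0, len(ref_tokens) - n + 1)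
--     cand_total = max(0, len(cand_tokens) - n + 1)
--     budget = {}
--     for i in range(ref_total):
--         g = tuple(ref_tokens[i : i + n])
--         budget[g] = budget.get(g, 0) + 1
--     overlap = 0
--     for i in range(cand_total):
--         g = tuple(cand_tokens[i : i + n])
--         b = budget.get(g, 0)
--         if b > 0:
--             overlap += 1
--             budget[g] = b - 1
--     return overlap, cand_total, ref_total
-- ===== Notes on version B (the rewrite author's own statement) =====
-- stated objective: alternative
-- what changed: Instead of building two Counters and summing element-wise minima over the candidate Counter's items, B builds only the reference n-gram count dict and clips it in a single consuming pass over the candidate n-grams, with both totals computed in closed form as max(0, len-n+1).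
import Mathlib
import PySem

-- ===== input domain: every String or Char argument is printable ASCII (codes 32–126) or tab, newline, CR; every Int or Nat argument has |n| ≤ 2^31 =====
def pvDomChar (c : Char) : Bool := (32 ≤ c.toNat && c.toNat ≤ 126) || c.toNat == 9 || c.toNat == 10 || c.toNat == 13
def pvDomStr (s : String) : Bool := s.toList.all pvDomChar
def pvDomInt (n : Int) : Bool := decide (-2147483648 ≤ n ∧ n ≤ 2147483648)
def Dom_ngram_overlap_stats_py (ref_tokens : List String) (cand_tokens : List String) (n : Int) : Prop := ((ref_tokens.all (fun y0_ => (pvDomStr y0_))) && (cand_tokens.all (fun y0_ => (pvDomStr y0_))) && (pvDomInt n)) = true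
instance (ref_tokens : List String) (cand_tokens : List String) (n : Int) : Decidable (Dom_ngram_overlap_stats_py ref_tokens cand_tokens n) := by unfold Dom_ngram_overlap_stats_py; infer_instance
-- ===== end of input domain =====

-- B replaces A's two Counters and element-wise min with a single reference-count
-- dict consumed by a one-pass clipping scan over the candidate n-grams, computing
-- the totals in closed form (alternative decomposition, same asymptotic cost).

-- ===== PORT A =====
-- _ngrams: Counter(tuple(tokens[i:i+n]) for i in range(0, max(0, len(tokens)-n+1)))
def pyNgramsA (tokens : List String) (n : Int) : PySem.Dict (List String) Int :=
  if n ≤ 0 then PySem.Dict.empty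
  else PySem.Dict.counter
    ((PySem.List.pyRange 0 (max 0 (PySem.List.len tokens - n + 1)) 1).map
      (fun i => PySem.List.slice tokens (some i) (some (i + n))))

def ngram_overlap_stats_py (ref_tokens : List String) (cand_tokens : List String) (n : Int) : Int × Int × Int :=
  let ref_ngr := pyNgramsA ref_tokens n
  let cand_ngr := pyNgramsA cand_tokens n
  let overlap := cand_ngr.items.foldl (fun acc p => acc + min p.2 (ref_ngr.getD p.1 0)) 0
  (overlap, cand_ngr.values.sum, ref_ngr.values.sum)

-- ===== PORT B =====
def ngram_overlap_stats_py_alt (ref_tokens : List String) (cand_tokens : List String) (n : Int) : Int × Int × Int :=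
  if n ≤ 0 then (0, 0, 0)
  else
    let ref_total := max 0 (PySem.List.len ref_tokens - n + 1)
    let cand_total := max 0 (PySem.List.len cand_tokens - n + 1)
    let budget := (PySem.List.pyRange 0 ref_total 1).foldl
      (fun d i =>
        let g := PySem.List.slice ref_tokens (some i) (some (i + n))
        d.insert g (d.getD g 0 + 1)) PySem.Dict.empty
    let res := (PySem.List.pyRange 0 cand_total 1).foldl
      (fun (st : Int × PySem.Dict (List String) Int) i =>
        let g := PySem.List.slice cand_tokens (some i) (some (i + n))
        let b := st.2.getD g 0
        if b > 0 then (st.1 + 1, st.2.insert g (b - 1)) else st) (0, budget)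
    (res.1, cand_total, ref_total)

-- ===== PRECONDITION & SPEC =====
def Spec_ngram_overlap_stats_py (ref_tokens : List String) (cand_tokens : List String) (n : Int) (out : Int × Int × Int) : Prop := out = ngram_overlap_stats_py_alt ref_tokens cand_tokens n
instance (ref_tokens : List String) (cand_tokens : List String) (n : Int) (out : Int × Int × Int) : Decidable (Spec_ngram_overlap_stats_py ref_tokens cand_tokens n out) := by unfold Spec_ngram_overlap_stats_py; infer_instance

-- ===== CLAIM (what is proved, stated in full; the proofs are below) =====
def Claim_equal_ngram_overlap_stats_py : Prop := ∀ (ref_tokens : List String) (cand_tokens : List String) (n : Int), Dom_ngram_overlap_stats_py ref_tokens cand_tokens n → Spec_ngram_overlap_stats_py ref_tokens cand_tokens n (ngram_overlap_stats_py ref_tokens cand_tokens n)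

-- ===== LEMMAS AND PROOFS =====

-- B's consuming loop computes the sum of clipped counts over any finite superset
-- of the scanned keys (entries of d below 0 never fire, hence the 'max · 0').
theorem consume_fold {G : Type} [BEq G] [LawfulBEq G] [DecidableEq G]
    (ys : List G) (d : PySem.Dict G Int) (acc : Int) (U : Finset G)
    (hU : ∀ g ∈ ys, g ∈ U) :
    (ys.foldl (fun (st : Int × PySem.Dict G Int) g =>
        let b := st.2.getD g 0
        if b > 0 then (st.1 + 1, st.2.insert g (b - 1)) else st) (acc, d)).1
      = acc + ∑ g ∈ U, min ((ys.count g : Int)) (max (d.getD g 0) 0) := by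
  induction ys generalizing d acc with
  | nil =>
      simp only [List.foldl_nil, List.count_nil]
      rw [Finset.sum_eq_zero (fun g _ => by omega)]
      omega
  | cons y t ih =>
      simp only [List.foldl_cons]
      by_cases hb : d.getD y 0 > 0
      · simp only [hb, if_pos]
        rw [ih (d.insert y (d.getD y 0 - 1)) (acc + 1) (fun g hg => hU g (List.mem_cons_of_mem _ hg))]
        have hyU : y ∈ U := hU y List.mem_cons_self
        rw [← Finset.add_sum_erase U _ hyU, ← Finset.add_sum_erase U _ hyU]
        have herase : ∑ g ∈ U.erase y, min ((t.count g : Int)) (max ((d.insert y (d.getD y 0 - 1)).getD g 0) 0)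
            = ∑ g ∈ U.erase y, min (((y :: t).count g : Int)) (max (d.getD g 0) 0) := by
          apply Finset.sum_congr rfl
          intro g hg
          have hgy : g ≠ y := Finset.ne_of_mem_erase hg
          rw [PySem.Dict.getD_insert]
          simp [hgy, Ne.symm hgy]
        rw [herase]
        rw [PySem.Dict.getD_insert]
        simp only [List.count_cons, beq_iff_eq]
        push_cast
        omega
      · simp only [hb, if_false]
        rw [ih d acc (fun g hg => hU g (List.mem_cons_of_mem _ hg))]
        congr 1
        apply Finset.sum_congr rfl
        intro g _
        by_cases hgy : g = y
        · subst hgy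
          simp only [List.count_cons, beq_iff_eq]
          omega
        · simp [Ne.symm hgy]

-- the item-wise fold of A over Counter(C) as a Finset sum of element-wise minima
theorem overlapA_eq {G : Type} [BEq G] [LawfulBEq G] [DecidableEq G] (C R : List G) :
    ((PySem.Dict.counter C).items.foldl
        (fun acc p => acc + min p.2 ((PySem.Dict.counter R).getD p.1 0)) 0)
      = ∑ g ∈ C.toFinset, min ((C.count g : Int)) ((R.count g : Int)) := by
  rw [PySem.Dict.items_counter, List.foldl_map, PySem.List.foldl_add]
  have h1 : ((PySem.Set.ofList C : List G).map
      (fun k => min ((C.count k : Int)) ((PySem.Dict.counter R).getD k 0))).sum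
      = ∑ g ∈ (PySem.Set.ofList C : List G).toFinset,
          min ((C.count g : Int)) ((PySem.Dict.counter R).getD g 0) := by
    rw [List.sum_toFinset _ (PySem.Set.nodup_ofList C)]
  simp only [zero_add]
  rw [h1]
  have h2 : (PySem.Set.ofList C : List G).toFinset = C.toFinset := by
    ext g; simp [List.mem_toFinset, PySem.Set.mem_ofList]
  rw [h2]
  apply Finset.sum_congr rfl
  intro g _
  rw [PySem.Dict.getD_counter]

-- counts agree across BEq instances (LawfulBEq pins both to equality)
theorem count_beq_eq {G : Type} [BEq G] [LawfulBEq G] [DecidableEq G] (l : List G) (x : G) :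
    l.count x = @List.count G instBEqOfDecidableEq x l := by
  induction l with
  | nil => rfl
  | cons a t ih => simp [List.count_cons, ih]

-- sum of Counter(C)'s values is the length of C
theorem valuesSum_counter {G : Type} [BEq G] [LawfulBEq G] [DecidableEq G] (C : List G) :
    (PySem.Dict.counter C).values.sum = (C.length : Int) := by
  have hv : (PySem.Dict.counter C).values
      = ((PySem.Dict.counter C).items).map (·.2) := rfl
  rw [hv, PySem.Dict.items_counter, List.map_map]
  have h1 : ((PySem.Set.ofList C : List G).map (fun k => (C.count k : Int))).sum
      = ∑ g ∈ (PySem.Set.ofList C : List G).toFinset, (C.count g : Int) := by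
    rw [List.sum_toFinset _ (PySem.Set.nodup_ofList C)]
  simp only [Function.comp_def] at h1 ⊢
  rw [h1]
  have h2 : (PySem.Set.ofList C : List G).toFinset = C.toFinset := by
    ext g; simp [List.mem_toFinset, PySem.Set.mem_ofList]
  rw [h2, ← Nat.cast_sum]
  have h3 : ∑ x ∈ C.toFinset, List.count x C
      = ∑ x ∈ C.toFinset, @List.count G instBEqOfDecidableEq x C :=
    Finset.sum_congr rfl (fun x _ => count_beq_eq C x)
  rw [h3, List.sum_toFinset_count_eq_length]

-- ===== VERDICT (by name: the statement is the Claim_ definition above) =====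
theorem ngram_overlap_stats_py_spec : Claim_equal_ngram_overlap_stats_py := by
  intro ref_tokens cand_tokens n _
  unfold Spec_ngram_overlap_stats_py ngram_overlap_stats_py ngram_overlap_stats_py_alt pyNgramsA
  by_cases hn : n ≤ 0
  · simp [hn, PySem.Dict.empty, PySem.Dict.values]
  · simp only [hn, if_false]
    set fr := fun i => PySem.List.slice ref_tokens (some i) (some (i + n)) with hfr
    set fc := fun i => PySem.List.slice cand_tokens (some i) (some (i + n)) with hfc
    set R := (PySem.List.pyRange 0 (max 0 (PySem.List.len ref_tokens - n + 1)) 1).map fr with hR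
    set C := (PySem.List.pyRange 0 (max 0 (PySem.List.len cand_tokens - n + 1)) 1).map fc with hC
    have hbudget : (PySem.List.pyRange 0 (max 0 (PySem.List.len ref_tokens - n + 1)) 1).foldl
        (fun d i => (PySem.Dict.insert d (fr i) (d.getD (fr i) 0 + 1))) PySem.Dict.empty
        = PySem.Dict.counter R := by
      rw [hR, ← PySem.Dict.foldl_insert_getD_add_one_eq_counter, List.foldl_map]
    have hcons : ∀ d0 : PySem.Dict (List String) Int,
        (PySem.List.pyRange 0 (max 0 (PySem.List.len cand_tokens - n + 1)) 1).foldl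
          (fun (st : Int × PySem.Dict (List String) Int) i =>
            let b := st.2.getD (fc i) 0
            if b > 0 then (st.1 + 1, st.2.insert (fc i) (b - 1)) else st) (0, d0)
        = C.foldl (fun (st : Int × PySem.Dict (List String) Int) g =>
            let b := st.2.getD g 0
            if b > 0 then (st.1 + 1, st.2.insert g (b - 1)) else st) (0, d0) := by
      intro d0; rw [hC, List.foldl_map]
    rw [hbudget, hcons]
    rw [consume_fold C (PySem.Dict.counter R) 0 C.toFinset (fun g hg => List.mem_toFinset.mpr hg)]
    rw [overlapA_eq C R, valuesSum_counter C, valuesSum_counter R]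
    have hov : ∑ g ∈ C.toFinset, min ((C.count g : Int)) ((R.count g : Int))
        = 0 + ∑ g ∈ C.toFinset, min ((C.count g : Int)) (max ((PySem.Dict.counter R).getD g 0) 0) := by
      rw [zero_add]
      apply Finset.sum_congr rfl
      intro g _
      rw [PySem.Dict.getD_counter]
      have : (0:Int) ≤ (R.count g : Int) := Int.natCast_nonneg _
      omega
    have hclen : (C.length : Int) = max 0 (PySem.List.len cand_tokens - n + 1) := by
      rw [hC]
      simp [PySem.List.length_pyRange_one]
    have hrlen : (R.length : Int) = max 0 (PySem.List.len ref_tokens - n + 1) := by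
      rw [hR]
      simp [PySem.List.length_pyRange_one]
    rw [hov, hclen, hrlen]
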